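-- pv_equiv track=rewrite | github.com/Ape/cogmindgraph | cogmindgraph/__main__.py | merge_aliases
-- ===== SOURCE A (Python) =====
-- import collections
--
-- def merge_aliases(scores):
--     Alias = collections.namedtuple("Alias", "name games")
--
--     def best_name(aliases):
--         return max(aliases, key=lambda x: len(x.games)).name
--
--     def merge_games(aliases):
--         return sum((x.games for x in aliases), [])
--
--     players = collections.defaultdict(list)
--     for player, games in scores.items():
--         canonical_name = player.lower().replace(".", "")
--         players[canonical_name].append(Alias(player, games))
--
--     return {best_name(x): merge_games(x) for x in players.values()}
-- ===== SOURCE B (Python) =====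
-- def merge_aliases(scores):
--     # one pass: canonical -> [best_name, best_game_count, merged_games]
--     merged = {}
--     for player, games in scores.items():
--         key = player.lower().replace(".", "")
--         entry = merged.get(key)
--         if entry is None:
--             merged[key] = [player, len(games), list(games)]
--         else:
--             entry[2].extend(games)
--             if len(games) > entry[1]:
--                 entry[0] = player
--                 entry[1] = len(games)
--     return {name: g for name, _, g in merged.values()}
-- ===== Notes on version B (the rewrite author's own statement) =====
-- stated objective: faster
-- what changed: Replaces the two-phase grouping (defaultdict of canonical->list of Alias namedtuples, then a dict comprehension calling max over each group and sum of lists) with a single pass that streams each item into a running (best_name, best_count, merged_games) summary per canonical key.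
import Mathlib
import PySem

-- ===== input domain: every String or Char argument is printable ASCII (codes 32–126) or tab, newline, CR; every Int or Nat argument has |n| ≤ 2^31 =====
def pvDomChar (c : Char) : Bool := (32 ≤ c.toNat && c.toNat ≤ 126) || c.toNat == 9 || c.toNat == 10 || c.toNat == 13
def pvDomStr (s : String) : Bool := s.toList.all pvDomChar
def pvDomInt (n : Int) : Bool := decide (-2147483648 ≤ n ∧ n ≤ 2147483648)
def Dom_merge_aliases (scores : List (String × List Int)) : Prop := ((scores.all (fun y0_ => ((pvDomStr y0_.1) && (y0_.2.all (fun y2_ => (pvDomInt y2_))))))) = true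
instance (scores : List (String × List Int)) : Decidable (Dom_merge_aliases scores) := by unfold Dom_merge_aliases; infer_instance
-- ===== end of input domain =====

-- B replaces A's two-phase grouping (defaultdict of aliases, then per-group max/sum) by a
-- single pass keeping a running (best name, best count, merged games) per canonical key.


-- ===== PORT A =====
-- canonical_name = player.lower().replace(".", "")
def pvCanon (p : String) : String := PySem.Str.replace (PySem.Str.lower p) "." ""

-- best_name: max(aliases, key=lambda x: len(x.games)).name  (Python max raises on [];
-- groups built by A are never empty, so the none branch is unreachable)
def pvBestName (aliases : List (String × List Int)) : String :=
  match PySem.List.max? aliases (fun x => (x.2.length : Int)) with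
  | some a => a.1
  | none => ""

-- merge_games: sum((x.games for x in aliases), [])
def pvMergeGames (aliases : List (String × List Int)) : List Int :=
  aliases.foldl (fun acc x => acc ++ x.2) []

def merge_aliases (scores : List (String × List Int)) : List (String × List Int) :=
  let players := scores.foldl
    (fun d pg => d.modify (pvCanon pg.1) [] (fun l => l ++ [pg])) PySem.Dict.empty
  (players.values.foldl
    (fun d x => d.insert (pvBestName x) (pvMergeGames x)) PySem.Dict.empty).items

-- ===== PORT B =====
-- one streaming update of the per-key summary (best name, best count, merged games)
def pvStepB (e : String × Int × List Int) (pg : String × List Int) : String × Int × List Int :=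
  ( if (pg.2.length : Int) > e.2.1 then pg.1 else e.1,
    if (pg.2.length : Int) > e.2.1 then (pg.2.length : Int) else e.2.1,
    e.2.2 ++ pg.2 )

def merge_aliases_alt (scores : List (String × List Int)) : List (String × List Int) :=
  let merged := scores.foldl
    (fun d pg =>
      let k := pvCanon pg.1
      match d.get? k with
      | none => d.insert k (pg.1, ((pg.2.length : Int), pg.2))
      | some e => d.insert k (pvStepB e pg)) PySem.Dict.empty
  (merged.values.foldl (fun d e => d.insert e.1 e.2.2) PySem.Dict.empty).items

-- ===== PRECONDITION & SPEC =====
def Spec_merge_aliases (scores : List (String × List Int)) (out : List (String × List Int)) : Prop := out = merge_aliases_alt scores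
instance (scores : List (String × List Int)) (out : List (String × List Int)) : Decidable (Spec_merge_aliases scores out) := by unfold Spec_merge_aliases; infer_instance

-- ===== CLAIM (what is proved, stated in full; the proofs are below) =====
def Claim_equal_merge_aliases : Prop := ∀ (scores : List (String × List Int)), Dom_merge_aliases scores → Spec_merge_aliases scores (merge_aliases scores)

-- ===== LEMMAS AND PROOFS =====

-- the group-wise summary B maintains incrementally
def pvBestLen (aliases : List (String × List Int)) : Int :=
  match PySem.List.max? aliases (fun x => (x.2.length : Int)) with
  | some a => (a.2.length : Int)
  | none => 0

def pvSumm (l : List (String × List Int)) : String × Int × List Int :=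
  (pvBestName l, pvBestLen l, pvMergeGames l)

theorem pvMax?_append_singleton (l : List (String × List Int)) (x : String × List Int) :
    PySem.List.max? (l ++ [x]) (fun a => (a.2.length : Int)) =
      match PySem.List.max? l (fun a => (a.2.length : Int)) with
      | none => some x
      | some m => if (m.2.length : Int) < (x.2.length : Int) then some x else some m := by
  simp only [PySem.List.max?, List.foldl_append, List.foldl_cons, List.foldl_nil]
  split <;> simp_all

theorem pvSumm_append (l : List (String × List Int)) (x : String × List Int) (hl : l ≠ []) :
    pvSumm (l ++ [x]) = pvStepB (pvSumm l) x := by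
  obtain ⟨m, hm⟩ : ∃ m, PySem.List.max? l (fun a => (a.2.length : Int)) = some m := by
    cases hml : PySem.List.max? l (fun a => (a.2.length : Int)) with
    | none => exact absurd ((PySem.List.max?_eq_none_iff l _).mp hml) hl
    | some m => exact ⟨m, rfl⟩
  rcases lt_or_ge ((m.2.length : Int)) ((x.2.length : Int)) with hc | hc
  · have hc' : m.2.length < x.2.length := by exact_mod_cast hc
    simp [pvSumm, pvBestName, pvBestLen, pvMergeGames, pvStepB,
      pvMax?_append_singleton, hm, hc, List.foldl_append, gt_iff_lt]
  · simp [pvSumm, pvBestName, pvBestLen, pvMergeGames, pvStepB,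
      pvMax?_append_singleton, hm, not_lt.mpr hc, List.foldl_append, gt_iff_lt]

theorem pvSumm_singleton (x : String × List Int) :
    pvSumm ([] ++ [x]) = (x.1, ((x.2.length : Int), x.2)) := by
  simp [pvSumm, pvBestName, pvBestLen, pvMergeGames, PySem.List.max?]

-- lookup transported through an items-level map
theorem pvGet?_of_items_map (dA : PySem.Dict String (List (String × List Int)))
    (dB : PySem.Dict String (String × Int × List Int))
    (h : dB.items = dA.items.map (fun kv => (kv.1, pvSumm kv.2))) (k : String) :
    dB.get? k = (dA.get? k).map pvSumm := by
  simp [PySem.Dict.get?, h, List.find?_map, Option.map_map, Function.comp_def]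

def pvInv (dA : PySem.Dict String (List (String × List Int)))
    (dB : PySem.Dict String (String × Int × List Int)) : Prop :=
  dB.items = dA.items.map (fun kv => (kv.1, pvSumm kv.2)) ∧
    (∀ kv ∈ dA.items, kv.2 ≠ []) ∧ dA.keys.Nodup

theorem pvInv_step (dA : PySem.Dict String (List (String × List Int)))
    (dB : PySem.Dict String (String × Int × List Int)) (pg : String × List Int)
    (h : pvInv dA dB) :
    pvInv (dA.modify (pvCanon pg.1) [] (fun l => l ++ [pg]))
      (match dB.get? (pvCanon pg.1) with
       | none => dB.insert (pvCanon pg.1) (pg.1, ((pg.2.length : Int), pg.2))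
       | some e => dB.insert (pvCanon pg.1) (pvStepB e pg)) := by
  obtain ⟨hit, hne, hnd⟩ := h
  have hget := pvGet?_of_items_map dA dB hit (pvCanon pg.1)
  simp only [PySem.Dict.modify]
  cases hA : dA.get? (pvCanon pg.1) with
  | none =>
    have hBnone : dB.get? (pvCanon pg.1) = none := by rw [hget, hA]; rfl
    have hcA : dA.contains (pvCanon pg.1) = false := by
      rw [PySem.Dict.contains_eq_isSome_get?, hA]; rfl
    have hcB : dB.contains (pvCanon pg.1) = false := by
      rw [PySem.Dict.contains_eq_isSome_get?, hBnone]; rfl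
    have hD : dA.getD (pvCanon pg.1) [] = [] := by simp [PySem.Dict.getD_eq_get?_getD, hA]
    rw [hBnone]
    refine ⟨?_, ?_, PySem.Dict.nodup_keys_insert _ _ _ hnd⟩
    · rw [PySem.Dict.items_insert_of_not_contains _ _ hcB,
        PySem.Dict.items_insert_of_not_contains _ _ hcA, hit, hD]
      simpa using (pvSumm_singleton pg).symm
    · intro kv hkv
      rw [PySem.Dict.items_insert_of_not_contains _ _ hcA, hD] at hkv
      rcases List.mem_append.mp hkv with h' | h'
      · exact hne kv h'
      · simp only [List.mem_singleton] at h'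
        subst h'; simp
  | some l =>
    have hBsome : dB.get? (pvCanon pg.1) = some (pvSumm l) := by rw [hget, hA]; rfl
    have hcA : dA.contains (pvCanon pg.1) = true := by
      rw [PySem.Dict.contains_eq_isSome_get?, hA]; rfl
    have hcB : dB.contains (pvCanon pg.1) = true := by
      rw [PySem.Dict.contains_eq_isSome_get?, hBsome]; rfl
    have hD : dA.getD (pvCanon pg.1) [] = l := by simp [PySem.Dict.getD_eq_get?_getD, hA]
    have hlne : l ≠ [] := hne _ (PySem.Dict.mem_items_of_get?_eq_some dA hA)
    rw [hBsome]
    refine ⟨?_, ?_, PySem.Dict.nodup_keys_insert _ _ _ hnd⟩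
    · rw [PySem.Dict.items_insert_of_contains _ _ hcB,
        PySem.Dict.items_insert_of_contains _ _ hcA, hit, hD, List.map_map, List.map_map]
      refine List.map_congr_left ?_
      intro kv hkv
      by_cases hk : kv.1 = pvCanon pg.1
      · simp [hk, pvSumm_append l pg hlne]
      · simp [hk]
    · intro kv hkv
      rw [PySem.Dict.items_insert_of_contains _ _ hcA, hD] at hkv
      rcases List.mem_map.mp hkv with ⟨p, hp, hpe⟩
      by_cases hk : p.1 = pvCanon pg.1
      · simp only [hk, beq_self_eq_true, if_true] at hpe
        subst hpe; intro hc; simp at hc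
      · rw [if_neg (by simp [hk])] at hpe
        subst hpe; exact hne p hp

theorem pvInv_fold (scores : List (String × List Int))
    (dA : PySem.Dict String (List (String × List Int)))
    (dB : PySem.Dict String (String × Int × List Int)) (h : pvInv dA dB) :
    pvInv (scores.foldl (fun d pg => d.modify (pvCanon pg.1) [] (fun l => l ++ [pg])) dA)
      (scores.foldl (fun d pg =>
        match d.get? (pvCanon pg.1) with
        | none => d.insert (pvCanon pg.1) (pg.1, ((pg.2.length : Int), pg.2))
        | some e => d.insert (pvCanon pg.1) (pvStepB e pg)) dB) := by
  induction scores generalizing dA dB with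
  | nil => exact h
  | cons pg rest ih => exact ih _ _ (pvInv_step dA dB pg h)

-- ===== VERDICT (by name: the statement is the Claim_ definition above) =====
theorem merge_aliases_spec : Claim_equal_merge_aliases := by
  intro scores _
  unfold Spec_merge_aliases merge_aliases merge_aliases_alt
  have h := pvInv_fold scores PySem.Dict.empty PySem.Dict.empty
    ⟨rfl, by simp [PySem.Dict.empty], by simp [PySem.Dict.empty, PySem.Dict.keys]⟩
  obtain ⟨hitems, -, -⟩ := h
  have hvals : (scores.foldl (fun d pg =>
        match d.get? (pvCanon pg.1) with
        | none => d.insert (pvCanon pg.1) (pg.1, ((pg.2.length : Int), pg.2))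
        | some e => d.insert (pvCanon pg.1) (pvStepB e pg)) PySem.Dict.empty).values
      = (scores.foldl (fun d pg => d.modify (pvCanon pg.1) [] (fun l => l ++ [pg])) PySem.Dict.empty).values.map pvSumm := by
    simp [PySem.Dict.values, hitems, List.map_map]
  simp only [hvals, List.foldl_map]
  rfl
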